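-- pv_equiv track=rewrite | github.com/arminiranpour/TailorResume-Demo | ai-service/app/pipelines/llm_scoring.py | _extract_first_balanced_json_object
-- ===== SOURCE A (Python) =====
-- def _extract_first_balanced_json_object(raw: str) -> str | None:
--     start: int | None = None
--     depth = 0
--     in_string = False
--     escape = False
--
--     for index, char in enumerate(raw):
--         if start is None:
--             if char == "{":
--                 start = index
--                 depth = 1
--             continue
--
--         if in_string:
--             if escape:
--                 escape = False
--             elif char == "\\":
--                 escape = True
--             elif char == '"':
--                 in_string = False
--             continue
--
--         if char == '"':
--             in_string = True
--             continue
--         if char == "{":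
--             depth += 1
--             continue
--         if char == "}":
--             depth -= 1
--             if depth == 0:
--                 return raw[start:index + 1]
--
--     return None
-- ===== SOURCE B (Python) =====
-- def _scan_string(raw, i):
--     """i is just after an opening quote; return the index after the closing quote, or None."""
--     n = len(raw)
--     while i < n:
--         c = raw[i]
--         if c == "\\":
--             i += 2
--         elif c == '"':
--             return i + 1
--         else:
--             i += 1
--     return None
--
--
-- def _scan_object(raw, i):
--     """i is just after an opening brace; return the index of its matching '}', or None."""
--     n = len(raw)
--     while i < n:
--         c = raw[i]
--         if c == '"':
--             i = _scan_string(raw, i + 1)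
--             if i is None:
--                 return None
--         elif c == "{":
--             inner = _scan_object(raw, i + 1)
--             if inner is None:
--                 return None
--             i = inner + 1
--         elif c == "}":
--             return i
--         else:
--             i += 1
--     return None
--
--
-- def _extract_first_balanced_json_object(raw):
--     s = 0
--     n = len(raw)
--     while s < n and raw[s] != "{":
--         s += 1
--     if s == n:
--         return None
--     end = _scan_object(raw, s + 1)
--     if end is None:
--         return None
--     return raw[s:end + 1]
-- ===== Notes on version B (the rewrite author's own statement) =====
-- stated objective: alternative
-- what changed: Replaced A's single flat loop with a (start, depth, in_string, escape) state machine by a recursive-descent matcher: one helper consumes a whole string literal (skipping two characters per backslash escape), another recurses per nested object and returns its closing brace's index; the top level finds the first opening brace, runs the object matcher, and slices.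
import Mathlib
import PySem

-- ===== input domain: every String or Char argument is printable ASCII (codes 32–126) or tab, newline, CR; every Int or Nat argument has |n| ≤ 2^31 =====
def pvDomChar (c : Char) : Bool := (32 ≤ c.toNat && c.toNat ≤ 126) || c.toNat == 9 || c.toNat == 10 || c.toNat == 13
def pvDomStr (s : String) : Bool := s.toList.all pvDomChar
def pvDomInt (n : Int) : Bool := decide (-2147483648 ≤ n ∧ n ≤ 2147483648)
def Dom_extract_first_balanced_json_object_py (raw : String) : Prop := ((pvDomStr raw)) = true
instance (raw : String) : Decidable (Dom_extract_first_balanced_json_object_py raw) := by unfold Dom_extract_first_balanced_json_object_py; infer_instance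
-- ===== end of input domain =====

-- B replaces A's flat depth-counter/in-string/escape state machine by a recursive-descent
-- matcher (one helper per construct: string literal, object); objective: alternative decomposition, not faster.

-- ===== PORT A =====
-- A's single for-loop over enumerate(raw) with state (start, depth, in_string, escape),
-- as structural recursion over the remaining characters; returns (start, closing index).
def pvLoopA : List Char → Nat → Option Nat → Nat → Bool → Bool → Option (Nat × Nat)
  | [], _, _, _, _, _ => none
  | c :: cs, i, none, d, ins, esc =>
      if c = '{' then pvLoopA cs (i+1) (some i) 1 ins esc
      else pvLoopA cs (i+1) none d ins esc
  | c :: cs, i, some s, d, ins, esc =>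
      if ins then
        if esc then pvLoopA cs (i+1) (some s) d ins false
        else if c = '\\' then pvLoopA cs (i+1) (some s) d ins true
        else if c = '"' then pvLoopA cs (i+1) (some s) d false esc
        else pvLoopA cs (i+1) (some s) d ins esc
      else if c = '"' then pvLoopA cs (i+1) (some s) d true esc
      else if c = '{' then pvLoopA cs (i+1) (some s) (d+1) ins esc
      else if c = '}' then
        if d - 1 = 0 then some (s, i)
        else pvLoopA cs (i+1) (some s) (d-1) ins esc
      else pvLoopA cs (i+1) (some s) d ins esc

def extract_first_balanced_json_object_py (raw : String) : Option String :=
  match pvLoopA raw.toList 0 none 0 false false with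
  | none => none
  | some (s, j) => some (PySem.Str.slice raw (some (s : Int)) (some ((j : Int) + 1)))

-- ===== PORT B =====
-- Source B's index-based while loops rendered as the obvious structural recursion over the
-- remaining suffix, carrying the absolute index alongside (raw[i] = head of the suffix).

-- _scan_string: returns (suffix after the closing quote, index after the closing quote).
def pvScanString : List Char → Nat → Option (List Char × Nat)
  | [], _ => none
  | c :: cs, i =>
      if c = '\\' then
        match cs with            -- i += 2: consume the escaped character as well
        | [] => none
        | _ :: cs' => pvScanString cs' (i+2)
      else if c = '"' then some (cs, i+1)
      else pvScanString cs (i+1)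

-- _scan_object: fuel-guarded only to make the same computation total (fuel = suffix length
-- suffices, proved below); returns (index of the matching '}', suffix after it).
def pvScanObjectF : Nat → List Char → Nat → Option (Nat × List Char)
  | 0, _, _ => none
  | _+1, [], _ => none
  | f+1, c :: cs, i =>
      if c = '"' then
        match pvScanString cs (i+1) with
        | none => none
        | some (cs', i') => pvScanObjectF f cs' i'
      else if c = '{' then
        match pvScanObjectF f cs (i+1) with
        | none => none
        | some (j, rest) => pvScanObjectF f rest (j+1)
      else if c = '}' then some (i, cs)
      else pvScanObjectF f cs (i+1)

def pvScanObject (cs : List Char) (i : Nat) : Option (Nat × List Char) :=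
  pvScanObjectF cs.length cs i

-- the top-level while loop locating the first '{'
def pvFindOpen : List Char → Nat → Option (Nat × List Char)
  | [], _ => none
  | c :: cs, s => if c = '{' then some (s, cs) else pvFindOpen cs (s+1)

def extract_first_balanced_json_object_py_alt (raw : String) : Option String :=
  match pvFindOpen raw.toList 0 with
  | none => none
  | some (s, rest) =>
      match pvScanObject rest (s+1) with
      | none => none
      | some (j, _) => some (PySem.Str.slice raw (some (s : Int)) (some ((j : Int) + 1)))

-- ===== PRECONDITION & SPEC =====
def Spec_extract_first_balanced_json_object_py (raw : String) (out : Option String) : Prop := out = extract_first_balanced_json_object_py_alt raw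
instance (raw : String) (out : Option String) : Decidable (Spec_extract_first_balanced_json_object_py raw out) := by unfold Spec_extract_first_balanced_json_object_py; infer_instance

-- ===== CLAIM (what is proved, stated in full; the proofs are below) =====
def Claim_equal_extract_first_balanced_json_object_py : Prop := ∀ (raw : String), Dom_extract_first_balanced_json_object_py raw → Spec_extract_first_balanced_json_object_py raw (extract_first_balanced_json_object_py raw)

-- ===== LEMMAS AND PROOFS =====

-- _scan_string consumes at least the closing quote.
theorem pvScanString_lt : ∀ (cs : List Char) (i : Nat) (cs' : List Char) (i' : Nat),
    pvScanString cs i = some (cs', i') → cs'.length < cs.length := by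
  have H : ∀ (n : Nat) (cs : List Char), cs.length ≤ n → ∀ (i : Nat) (cs' : List Char) (i' : Nat),
      pvScanString cs i = some (cs', i') → cs'.length < cs.length := by
    intro n
    induction n using Nat.strong_induction_on with
    | _ n ihn =>
      intro cs hn i r i' h
      match cs with
      | [] => simp [pvScanString] at h
      | c :: cs =>
        rw [pvScanString.eq_def] at h
        by_cases hb : c = '\\'
        · simp [hb] at h
          match cs with
          | [] => simp at h
          | c2 :: cs' =>
              simp at h hn
              have := ihn cs'.length (by omega) cs' (le_refl _) (i+2) r i' h
              simp; omega
        · by_cases hq : c = '"'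
          · simp [hq] at h
            simp [h.1]
          · simp [hb, hq] at h
            simp at hn
            have := ihn cs.length (by omega) cs (le_refl _) (i+1) r i' h
            simp; omega
  intro cs i cs' i' h
  exact H cs.length cs (le_refl _) i cs' i' h

-- _scan_object consumes at least the closing brace.
theorem pvScanObjectF_lt : ∀ (f : Nat) (cs : List Char) (i j : Nat) (rest : List Char),
    pvScanObjectF f cs i = some (j, rest) → rest.length < cs.length := by
  intro f
  induction f with
  | zero => intro cs i j rest h; simp [pvScanObjectF] at h
  | succ f ih =>
      intro cs i j rest h
      match cs with
      | [] => simp [pvScanObjectF] at h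
      | c :: cs =>
        rw [pvScanObjectF] at h
        by_cases hq : c = '"'
        · simp [hq] at h
          match hs : pvScanString cs (i+1) with
          | none => rw [hs] at h; simp at h
          | some (cs', i') =>
              rw [hs] at h; simp at h
              have h1 := pvScanString_lt cs (i+1) cs' i' hs
              have h2 := ih cs' i' j rest h
              simp; omega
        · by_cases hb : c = '{'
          · simp [hb] at h
            match hin : pvScanObjectF f cs (i+1) with
            | none => rw [hin] at h; simp at h
            | some (j1, r1) =>
                rw [hin] at h; simp at h
                have h1 := ih cs (i+1) j1 r1 hin
                have h2 := ih r1 (j1+1) j rest h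
                simp; omega
          · by_cases hc : c = '}'
            · simp [hc] at h
              simp [h.2]
            · simp [hq, hb, hc] at h
              have := ih cs (i+1) j rest h
              simp; omega

-- A's in-string mode equals B's _scan_string followed by A's loop back in normal mode.
theorem pvLoopA_string : ∀ (cs : List Char) (i s d : Nat),
    pvLoopA cs i (some s) d true false =
      (match pvScanString cs i with
       | none => none
       | some (cs', i') => pvLoopA cs' i' (some s) d false false) := by
  have H : ∀ (n : Nat) (cs : List Char), cs.length ≤ n → ∀ (i s d : Nat),
      pvLoopA cs i (some s) d true false =
        (match pvScanString cs i with
         | none => none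
         | some (cs', i') => pvLoopA cs' i' (some s) d false false) := by
    intro n
    induction n using Nat.strong_induction_on with
    | _ n ihn =>
      intro cs hn i s d
      match cs with
      | [] => simp [pvLoopA, pvScanString]
      | c :: cs =>
        by_cases hb : c = '\\'
        · rw [pvLoopA, pvScanString.eq_def]
          simp [hb]
          match cs with
          | [] => simp [pvLoopA]
          | c2 :: cs' =>
              rw [pvLoopA]
              simp at hn ⊢
              exact ihn cs'.length (by omega) cs' (le_refl _) (i+2) s d
        · by_cases hq : c = '"'
          · rw [pvLoopA, pvScanString.eq_def]; simp [hq]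
          · rw [pvLoopA, pvScanString.eq_def]
            simp [hb, hq]
            simp at hn
            exact ihn cs.length (by omega) cs (le_refl _) (i+1) s d
  intro cs i s d
  exact H cs.length cs (le_refl _) i s d

-- A's depth-counter loop at depth d+1 equals B's recursive-descent _scan_object
-- followed by the loop one level up.
theorem pvLoopA_object : ∀ (n : Nat) (cs : List Char), cs.length ≤ n →
    ∀ (f : Nat), cs.length ≤ f → ∀ (i s d : Nat),
    pvLoopA cs i (some s) (d+1) false false =
      (match pvScanObjectF f cs i with
       | none => none
       | some (j, rest) =>
           if d = 0 then some (s, j) else pvLoopA rest (j+1) (some s) d false false) := by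
  intro n
  induction n using Nat.strong_induction_on with
  | _ n ihn =>
    intro cs hn f hf i s d
    match cs with
    | [] =>
        match f with
        | 0 => simp [pvLoopA, pvScanObjectF]
        | _+1 => simp [pvLoopA, pvScanObjectF]
    | c :: cs =>
      match f with
      | f+1 =>
        simp at hn hf
        rw [pvLoopA, pvScanObjectF]
        by_cases hq : c = '"'
        · simp [hq]
          rw [pvLoopA_string]
          match hs : pvScanString cs (i+1) with
          | none => rfl
          | some (cs', i') =>
              simp
              have h1 := pvScanString_lt cs (i+1) cs' i' hs
              exact ihn cs'.length (by omega) cs' (le_refl _) f (by omega) i' s d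
        · by_cases hb : c = '{'
          · simp [hb]
            have step : pvLoopA cs (i+1) (some s) (d+1+1) false false =
                (match pvScanObjectF f cs (i+1) with
                 | none => none
                 | some (j, rest) =>
                     if d + 1 = 0 then some (s, j)
                     else pvLoopA rest (j+1) (some s) (d+1) false false) :=
              ihn cs.length (by omega) cs (le_refl _) f (by omega) (i+1) s (d+1)
            rw [step]
            match hin : pvScanObjectF f cs (i+1) with
            | none => rfl
            | some (j1, r1) =>
                simp
                have h1 := pvScanObjectF_lt f cs (i+1) j1 r1 hin
                exact ihn r1.length (by omega) r1 (le_refl _) f (by omega) (j1+1) s d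
          · by_cases hc : c = '}'
            · simp [hc]
            · simp [hq, hb, hc]
              exact ihn cs.length (by omega) cs (le_refl _) f (by omega) (i+1) s d

-- A's pre-start phase equals B's scan for the first '{'.
theorem pvLoopA_find : ∀ (cs : List Char) (i d : Nat),
    pvLoopA cs i none d false false =
      (match pvFindOpen cs i with
       | none => none
       | some (s, rest) => pvLoopA rest (s+1) (some s) 1 false false) := by
  intro cs
  induction cs with
  | nil => intro i d; simp [pvLoopA, pvFindOpen]
  | cons c cs ih =>
      intro i d
      by_cases hb : c = '{'
      · rw [pvLoopA, pvFindOpen]; simp [hb]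
      · rw [pvLoopA, pvFindOpen]; simp [hb]; exact ih (i+1) d

-- ===== VERDICT (by name: the statement is the Claim_ definition above) =====
theorem extract_first_balanced_json_object_py_spec : Claim_equal_extract_first_balanced_json_object_py := by
  intro raw _
  unfold Spec_extract_first_balanced_json_object_py
  unfold extract_first_balanced_json_object_py extract_first_balanced_json_object_py_alt
  rw [pvLoopA_find]
  match hfo : pvFindOpen raw.toList 0 with
  | none => rfl
  | some (s, rest) =>
      simp only []
      rw [pvLoopA_object rest.length rest (le_refl _) rest.length (le_refl _) (s+1) s 0]
      unfold pvScanObject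
      match hso : pvScanObjectF rest.length rest (s+1) with
      | none => rfl
      | some (j, r) => simp
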